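-- pv_equiv track=rewrite | github.com/chaimshvadron/pubsub-20newsgroups-kafka-mongodb | publisher/category_selector.py | select_one_per_category
-- ===== SOURCE A (Python) =====
-- def select_one_per_category(messages, categories):
--     selected = []
--     for cat in categories:
--         for i, msg in enumerate(messages):
--             if msg.get('category') == cat:
--                 selected.append(msg)
--                 messages.pop(i)
--                 break
--     return selected
-- ===== SOURCE B (Python) =====
-- def select_one_per_category(messages, categories):
--     # One pass: group messages into per-category FIFO queues, then pop the
--     # front of the requested queue per category. (Does not mutate `messages`;
--     # equivalence is about the return value.)
--     pairs = [(msg.get('category'), msg) for msg in messages]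
--     queues = {}
--     for k, m in pairs:
--         queues.setdefault(k, []).append(m)
--     selected = []
--     for cat in categories:
--         q = queues.get(cat)
--         if q:
--             selected.append(q.pop(0))
--     return selected
-- ===== Notes on version B (the rewrite author's own statement) =====
-- stated objective: faster
-- what changed: Instead of scanning (and popping from) the whole message list once per category, B groups messages into per-category FIFO queues in a single pass over the messages and then pops the front of the requested queue for each category; B does not mutate the messages argument (the equivalence is about the return value).
import Mathlib
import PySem

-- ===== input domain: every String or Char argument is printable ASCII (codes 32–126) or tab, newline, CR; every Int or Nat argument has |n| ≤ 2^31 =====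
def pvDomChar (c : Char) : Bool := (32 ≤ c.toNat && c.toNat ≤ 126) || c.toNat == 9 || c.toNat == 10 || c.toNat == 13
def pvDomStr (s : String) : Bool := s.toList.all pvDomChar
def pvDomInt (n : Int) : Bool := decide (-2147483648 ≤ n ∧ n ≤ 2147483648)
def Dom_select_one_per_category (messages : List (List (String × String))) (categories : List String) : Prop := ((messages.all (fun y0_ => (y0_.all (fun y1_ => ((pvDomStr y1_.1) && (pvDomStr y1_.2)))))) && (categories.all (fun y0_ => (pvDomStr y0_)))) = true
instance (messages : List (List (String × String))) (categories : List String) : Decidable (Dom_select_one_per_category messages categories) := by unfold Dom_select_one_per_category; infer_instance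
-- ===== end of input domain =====

-- B replaces A's per-category rescans of the message list by one grouping pass into
-- per-category FIFO queues (faster). A mutates `messages` in place (pop); B does not:
-- the equivalence proved here is about the RETURN value only.

-- ===== PORT A =====

-- msg.get('category') : first-match lookup in the association list (Python dict lookup)
def keyOf (m : List (String × String)) : Option String :=
  (PySem.Dict.mk m).get? "category"

-- the inner loop of A: enumerate, on first msg with msg.get('category') == cat
-- return it together with messages after messages.pop(i) (break); none = no match
def popFirst (cat : String) : List (List (String × String)) → Option ((List (String × String)) × List (List (String × String)))
  | [] => none
  | m :: rest =>
    if keyOf m = some cat then some (m, rest)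
    else
      match popFirst cat rest with
      | some (x, r) => some (x, m :: r)
      | none => none

def selStepA (st : List (List (String × String)) × List (List (String × String))) (cat : String) :
    List (List (String × String)) × List (List (String × String)) :=
  match popFirst cat st.2 with
  | some (m, rest) => (st.1 ++ [m], rest)
  | none => st

def select_one_per_category (messages : List (List (String × String))) (categories : List String) : List (List (String × String)) :=
  (categories.foldl selStepA ([], messages)).1

-- ===== PORT B =====

-- for cat: q = queues.get(cat); if q: selected.append(q.pop(0))
def selStepB (st : List (List (String × String)) × PySem.Dict (Option String) (List (List (String × String)))) (cat : String) :
    List (List (String × String)) × PySem.Dict (Option String) (List (List (String × String))) :=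
  match st.2.getD (some cat) [] with
  | m :: rest => (st.1 ++ [m], st.2.insert (some cat) rest)
  | [] => st

def select_one_per_category_alt (messages : List (List (String × String))) (categories : List String) : List (List (String × String)) :=
  let pairs := messages.map (fun m => (keyOf m, m))
  let queues := pairs.foldl (fun d p => d.modify p.1 [] (· ++ [p.2])) PySem.Dict.empty
  (categories.foldl selStepB ([], queues)).1

-- ===== PRECONDITION & SPEC =====
def Spec_select_one_per_category (messages : List (List (String × String))) (categories : List String) (out : List (List (String × String))) : Prop := out = select_one_per_category_alt messages categories
instance (messages : List (List (String × String))) (categories : List String) (out : List (List (String × String))) : Decidable (Spec_select_one_per_category messages categories out) := by unfold Spec_select_one_per_category; infer_instance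

-- ===== CLAIM (what is proved, stated in full; the proofs are below) =====
def Claim_equal_select_one_per_category : Prop := ∀ (messages : List (List (String × String))) (categories : List String), Dom_select_one_per_category messages categories → Spec_select_one_per_category messages categories (select_one_per_category messages categories)

-- ===== LEMMAS AND PROOFS =====

-- the predicate "this message belongs to category c"
def pcat (c : String) (m : List (String × String)) : Bool := decide (keyOf m = some c)

-- A's inner loop characterised by filter / eraseP
lemma popFirst_eq (cat : String) (msgs : List (List (String × String))) :
    popFirst cat msgs =
      match msgs.filter (pcat cat) with
      | [] => none
      | m :: _ => some (m, msgs.eraseP (pcat cat)) := by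
  induction msgs with
  | nil => rfl
  | cons m rest ih =>
    by_cases h : keyOf m = some cat
    · simp [popFirst, h, pcat]
    · simp only [popFirst, h, ih, pcat, List.filter_cons, List.eraseP_cons,
        decide_eq_true_eq]
      cases hf : rest.filter (pcat cat) with
      | nil => simp
      | cons x xs => simp

lemma filter_eraseP_self (q : α → Bool) (l : List α) :
    (l.eraseP q).filter q = (l.filter q).tail := by
  induction l with
  | nil => rfl
  | cons a l ih =>
    by_cases h : q a
    · simp [h]
    · simp [h, ih]

lemma filter_eraseP_of_disjoint (q r : α → Bool) (l : List α)
    (hd : ∀ a, q a = true → r a = false) :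
    (l.eraseP q).filter r = l.filter r := by
  induction l with
  | nil => rfl
  | cons a l ih =>
    by_cases h : q a
    · simp [h, hd a h]
    · have h' : q a = false := by simpa using h
      simp [List.eraseP_cons, h', List.filter_cons, ih]

-- the loop invariant: B's dict of queues realises, per category, the filter of A's remaining list
lemma loop_eq (cats : List String) (sel msgs : List (List (String × String)))
    (d : PySem.Dict (Option String) (List (List (String × String))))
    (h : ∀ c : String, d.getD (some c) [] = msgs.filter (pcat c)) :
    (cats.foldl selStepA (sel, msgs)).1 = (cats.foldl selStepB (sel, d)).1 := by
  induction cats generalizing sel msgs d with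
  | nil => rfl
  | cons cat cats ih =>
    simp only [List.foldl_cons]
    have hA : selStepA (sel, msgs) cat =
        match msgs.filter (pcat cat) with
        | [] => (sel, msgs)
        | m :: _ => (sel ++ [m], msgs.eraseP (pcat cat)) := by
      simp only [selStepA, popFirst_eq]
      cases msgs.filter (pcat cat) <;> rfl
    have hB : selStepB (sel, d) cat =
        match msgs.filter (pcat cat) with
        | [] => (sel, d)
        | m :: rest => (sel ++ [m], d.insert (some cat) rest) := by
      simp only [selStepB, h cat]
      cases msgs.filter (pcat cat) <;> rfl
    cases hf : msgs.filter (pcat cat) with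
    | nil =>
      rw [hA, hB]; simp only [hf]
      exact ih sel msgs d h
    | cons m rest =>
      rw [hA, hB]; simp only [hf]
      apply ih
      intro c
      rw [PySem.Dict.getD_insert]
      by_cases hc : (some c : Option String) = some cat
      · have : c = cat := by simpa using hc
        subst this
        simp [filter_eraseP_self, hf]
      · have hne : c ≠ cat := by intro e; exact hc (by rw [e])
        rw [if_neg hc]
        rw [filter_eraseP_of_disjoint (pcat cat) (pcat c) msgs]
        · exact h c
        · intro a ha
          simp only [pcat, decide_eq_true_eq] at ha ⊢
          rw [ha]; simp only [Option.some.injEq, decide_eq_false_iff_not]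
          exact fun e => hne e.symm

-- ===== VERDICT (by name: the statement is the Claim_ definition above) =====
theorem select_one_per_category_spec : Claim_equal_select_one_per_category := by
  intro messages categories _
  show select_one_per_category messages categories = select_one_per_category_alt messages categories
  unfold select_one_per_category select_one_per_category_alt
  apply loop_eq
  intro c
  rw [PySem.Dict.getD_foldl_modify_append]
  simp [PySem.Dict.getD_empty, List.filter_map, Function.comp_def]
  exact List.filter_congr (fun a _ => by simp [pcat, Bool.beq_eq_decide_eq])
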